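-- pv_equiv track=rewrite | github.com/mercyzi/HAIformer | data_utils.py | lmax_acc
-- ===== SOURCE A (Python) =====
-- def lmax_acc(arrays: list, hes: list):
--     cur_val = arrays[-1]
--     max_val = max(arrays)
--     max_indexs = []
--     for indx in range(len(arrays)):
--         if arrays[indx] == max_val:
--             max_indexs.append(indx)
--     min_he = 10
--     for inx in max_indexs:
--         if min_he > hes[inx]:
--             max_index = inx
--             min_he = hes[inx]
--     return cur_val, max_val, max_index
-- ===== SOURCE B (Python) =====
-- def lmax_acc(arrays: list, hes: list):
--     cur_val = arrays[-1]
--     n = len(arrays)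
--     max_val, min_he, max_index = arrays[n - 1], hes[n - 1], n - 1
--     for i in range(n - 2, -1, -1):
--         if arrays[i] > max_val or (arrays[i] == max_val and hes[i] <= min_he):
--             max_val, min_he, max_index = arrays[i], hes[i], i
--     return cur_val, max_val, max_index
-- ===== Notes on version B (the rewrite author's own statement) =====
-- stated objective: alternative
-- what changed: Replaces A's three staged passes (max() scan, argmax-index list construction, sentinel-10 running-min scan) with a single backward scan keeping one (max_val, min_he, max_index) accumulator with <=-tie-breaking; Pre_ restricts to the natural parallel-lists domain (len(hes) >= len(arrays)) and to inputs where some argmax position has he < 10, since otherwise A raises UnboundLocalError.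
-- outside the precondition, e.g. on lmax_acc([2, 1], [0]): A returns (1, 2, 0), B raises IndexError
import Mathlib
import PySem

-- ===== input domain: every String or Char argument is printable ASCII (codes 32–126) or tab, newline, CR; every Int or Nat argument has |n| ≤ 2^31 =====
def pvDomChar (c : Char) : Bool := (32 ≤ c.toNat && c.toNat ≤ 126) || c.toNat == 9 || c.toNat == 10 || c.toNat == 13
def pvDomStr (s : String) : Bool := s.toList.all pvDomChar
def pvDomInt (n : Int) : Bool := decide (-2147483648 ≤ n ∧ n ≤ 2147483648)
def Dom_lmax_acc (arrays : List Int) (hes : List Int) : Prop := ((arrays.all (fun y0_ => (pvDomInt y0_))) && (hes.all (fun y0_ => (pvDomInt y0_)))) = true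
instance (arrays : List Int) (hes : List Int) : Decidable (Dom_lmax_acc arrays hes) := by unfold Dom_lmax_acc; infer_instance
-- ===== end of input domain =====

-- B replaces A's three staged passes (max() scan, argmax-index list, sentinel running-min
-- scan) with one backward scan keeping a (max_val, min_he, max_index) accumulator.

-- ===== PORT A =====
def lmax_acc (arrays : List Int) (hes : List Int) : Int × Int × Int :=
  let cur_val := (PySem.List.pyGet? arrays (-1)).getD 0
  let max_val := (PySem.List.max? arrays (fun y => y)).getD 0
  let max_indexs := (PySem.List.pyRange 0 (arrays.length : Int) 1).foldl
      (fun acc indx =>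
        if PySem.List.pyGetD arrays indx 0 = max_val then acc ++ [indx] else acc) []
  let st := max_indexs.foldl
      (fun (st : Option Int × Int) inx =>
        if st.2 > PySem.List.pyGetD hes inx 0 then (some inx, PySem.List.pyGetD hes inx 0) else st)
      (none, 10)
  (cur_val, max_val, st.1.getD 0)

-- ===== PORT B =====
def lmax_acc_alt (arrays : List Int) (hes : List Int) : Int × Int × Int :=
  let cur_val := (PySem.List.pyGet? arrays (-1)).getD 0
  let n : Int := (arrays.length : Int)
  let st := (PySem.List.pyRange (n - 2) (-1) (-1)).foldl
      (fun (st : Int × Int × Int) i =>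
        if PySem.List.pyGetD arrays i 0 > st.1 ∨
           (PySem.List.pyGetD arrays i 0 = st.1 ∧ PySem.List.pyGetD hes i 0 ≤ st.2.1)
        then (PySem.List.pyGetD arrays i 0, PySem.List.pyGetD hes i 0, i) else st)
      (PySem.List.pyGetD arrays (n - 1) 0, PySem.List.pyGetD hes (n - 1) 0, n - 1)
  (cur_val, st.1, st.2.2)

-- ===== PRECONDITION & SPEC =====
-- Pre_ excludes empty arrays (A raises IndexError), inputs where every argmax position has
-- he >= 10 (A raises UnboundLocalError), and hes shorter than arrays — the intended domain is
-- parallel lists; B raises IndexError on some such inputs where A happens to return.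
def Pre_lmax_acc (arrays : List Int) (hes : List Int) : Prop :=
  arrays ≠ [] ∧ arrays.length ≤ hes.length ∧
  ∃ i < arrays.length, arrays.getD i 0 = (PySem.List.max? arrays (fun y => y)).getD 0 ∧
    hes.getD i 0 < 10
instance (arrays : List Int) (hes : List Int) : Decidable (Pre_lmax_acc arrays hes) := by
  unfold Pre_lmax_acc; infer_instance

def pvWitness_lmax_acc : List Int × List Int := ([0], [0])

def Spec_lmax_acc (arrays : List Int) (hes : List Int) (out : Int × Int × Int) : Prop := out = lmax_acc_alt arrays hes
instance (arrays : List Int) (hes : List Int) (out : Int × Int × Int) : Decidable (Spec_lmax_acc arrays hes out) := by unfold Spec_lmax_acc; infer_instance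

-- ===== CLAIM (what is proved, stated in full; the proofs are below) =====
def Claim_equal_lmax_acc : Prop := ∀ (arrays : List Int) (hes : List Int), Dom_lmax_acc arrays hes → Pre_lmax_acc arrays hes → Spec_lmax_acc arrays hes (lmax_acc arrays hes)

-- ===== LEMMAS AND PROOFS =====

-- reversed ranges: range(m-1, -1, -1) is range(m) reversed
lemma pv_revrange (m : Nat) : ((List.range m).map (fun k : Nat => (k:Int))).reverse
    = (List.range m).map (fun k : Nat => (m:Int) - 1 - (k:Int)) := by
  rw [← List.map_reverse, List.range_eq_range', List.reverse_range', List.map_map,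
    ← List.range_eq_range']
  apply List.map_congr_left
  intro k hk
  simp only [List.mem_range] at hk
  simp only [Function.comp]
  omega

lemma pv_pyRange_down (m : Nat) : PySem.List.pyRange ((m:Int) - 1) (-1) (-1)
    = ((List.range m).map (fun k : Nat => (k:Int))).reverse := by
  rw [pv_revrange]
  simp only [PySem.List.pyRange]
  norm_num
  rcases Nat.eq_zero_or_pos m with h | h
  · subst h; norm_num
  · rw [if_pos h]
    apply List.map_congr_left
    intro k hk
    ring

-- first index (in list order) attaining the minimum of h, among values below the bound m
def pvSel (h : Nat → Int) : List Nat → Int → Option Nat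
  | [], _ => none
  | x :: K, m => if h x < m then some ((pvSel h K (h x)).getD x) else pvSel h K m

lemma pvSel_none_iff (h : Nat → Int) (K : List Nat) : ∀ m : Int,
    pvSel h K m = none ↔ ∀ x ∈ K, m ≤ h x := by
  induction K with
  | nil => intro m; simp [pvSel]
  | cons x K ih =>
    intro m
    simp only [pvSel, List.mem_cons]
    by_cases hx : h x < m
    · rw [if_pos hx]
      simp only [reduceCtorEq, false_iff, not_forall]
      refine ⟨x, ⟨Or.inl rfl, by omega⟩⟩
    · rw [if_neg hx, ih]
      constructor
      · rintro hall y (rfl | hy)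
        · omega
        · exact hall y hy
      · intro hall y hy; exact hall y (Or.inr hy)

lemma pvSel_spec (h : Nat → Int) (K : List Nat) : ∀ (m : Int) (d : Nat),
    pvSel h K m = some d →
    d ∈ K ∧ h d < m ∧ (∀ x ∈ K, h d ≤ h x) ∧
      ∃ K1 K2, K = K1 ++ d :: K2 ∧ ∀ x ∈ K1, h d < h x := by
  induction K with
  | nil => intro m d hd; simp [pvSel] at hd
  | cons x K ih =>
    intro m d hd
    simp only [pvSel] at hd
    by_cases hx : h x < m
    · rw [if_pos hx] at hd
      rcases hsel : pvSel h K (h x) with _ | d'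
      · rw [hsel] at hd
        simp only [Option.getD_none, Option.some.injEq] at hd
        have hmin := (pvSel_none_iff h K (h x)).mp hsel
        subst hd
        refine ⟨List.mem_cons_self, hx, ?_, [], K, rfl, by simp⟩
        intro y hy
        rcases List.mem_cons.mp hy with rfl | hy
        · exact le_refl _
        · exact hmin y hy
      · rw [hsel] at hd
        simp only [Option.getD_some, Option.some.injEq] at hd
        subst hd
        obtain ⟨hmem, hlt, hmin, K1, K2, hK, hfirst⟩ := ih (h x) d' hsel
        refine ⟨List.mem_cons_of_mem _ hmem, by omega, ?_, x :: K1, K2, by simp [hK], ?_⟩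
        · intro y hy
          rcases List.mem_cons.mp hy with rfl | hy
          · omega
          · exact hmin y hy
        · intro y hy
          rcases List.mem_cons.mp hy with rfl | hy
          · omega
          · exact hfirst y hy
    · rw [if_neg hx] at hd
      obtain ⟨hmem, hlt, hmin, K1, K2, hK, hfirst⟩ := ih m d hd
      refine ⟨List.mem_cons_of_mem _ hmem, hlt, ?_, x :: K1, K2, by simp [hK], ?_⟩
      · intro y hy
        rcases List.mem_cons.mp hy with rfl | hy
        · omega
        · exact hmin y hy
      · intro y hy
        rcases List.mem_cons.mp hy with rfl | hy
        · omega
        · exact hfirst y hy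

-- A's sentinel fold computes pvSel
lemma pv_foldA_sel (h : Nat → Int) (K : List Nat) : ∀ (o : Option Int) (m : Int),
    (K.foldl (fun (st : Option Int × Int) k =>
        if st.2 > h k then (some (k:Int), h k) else st) (o, m)).1
    = match pvSel h K m with | some d => some ((d:Int)) | none => o := by
  induction K with
  | nil => intro o m; simp [pvSel]
  | cons x K ih =>
    intro o m
    simp only [List.foldl_cons, pvSel]
    by_cases hx : h x < m
    · rw [if_pos (by omega : m > h x), if_pos hx, ih (some (x:Int)) (h x)]
      rcases hsel : pvSel h K (h x) with _ | d' <;> simp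
    · rw [if_neg (by omega : ¬ m > h x), if_neg hx, ih o m]

-- B's loop body, on Nat indices
def pvStepB (arrays hes : List Int) (st : Int × Int × Int) (k : Nat) : Int × Int × Int :=
  if arrays.getD k 0 > st.1 ∨ (arrays.getD k 0 = st.1 ∧ hes.getD k 0 ≤ st.2.1)
  then (arrays.getD k 0, hes.getD k 0, (k:Int)) else st

-- B's loop invariant: st is the best element of arrays[lo:]
def pvGoodB (arrays hes : List Int) (lo : Nat) (st : Int × Int × Int) : Prop :=
  ∃ J : Nat, st = (arrays.getD J 0, hes.getD J 0, (J:Int)) ∧ lo ≤ J ∧ J < arrays.length ∧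
    (∀ j, lo ≤ j → j < arrays.length → arrays.getD j 0 ≤ arrays.getD J 0) ∧
    (∀ j, lo ≤ j → j < arrays.length → arrays.getD j 0 = arrays.getD J 0 →
      hes.getD J 0 ≤ hes.getD j 0) ∧
    (∀ j, lo ≤ j → j < J → arrays.getD j 0 = arrays.getD J 0 →
      hes.getD J 0 < hes.getD j 0)

lemma pvStepB_good (arrays hes : List Int) (m : Nat) (st : Int × Int × Int)
    (hg : pvGoodB arrays hes (m+1) st) : pvGoodB arrays hes m (pvStepB arrays hes st m) := by
  obtain ⟨J, hst, hloJ, hJn, hmax, hmin, hfirst⟩ := hg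
  subst hst
  unfold pvStepB
  simp only
  by_cases hc : arrays.getD m 0 > arrays.getD J 0 ∨
      (arrays.getD m 0 = arrays.getD J 0 ∧ hes.getD m 0 ≤ hes.getD J 0)
  · rw [if_pos hc]
    refine ⟨m, rfl, le_refl m, by omega, ?_, ?_, ?_⟩
    · intro j hj hjn
      rcases Nat.eq_or_lt_of_le hj with rfl | hj'
      · exact le_refl _
      · have := hmax j hj' hjn
        rcases hc with hgt | ⟨heq, _⟩ <;> omega
    · intro j hj hjn heq
      rcases Nat.eq_or_lt_of_le hj with rfl | hj'
      · exact le_refl _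
      · have h1 := hmax j hj' hjn
        rcases hc with hgt | ⟨heq2, hle⟩
        · omega
        · exact le_trans hle (hmin j hj' hjn (by omega))
    · intro j _ hjm _
      omega
  · rw [if_neg hc]
    push Not at hc
    obtain ⟨hle, himp⟩ := hc
    refine ⟨J, rfl, by omega, hJn, ?_, ?_, ?_⟩
    · intro j hj hjn
      rcases Nat.eq_or_lt_of_le hj with rfl | hj'
      · omega
      · exact hmax j hj' hjn
    · intro j hj hjn heq
      rcases Nat.eq_or_lt_of_le hj with rfl | hj'
      · have := himp heq; omega
      · exact hmin j hj' hjn heq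
    · intro j hj hjJ heq
      rcases Nat.eq_or_lt_of_le hj with rfl | hj'
      · have := himp heq; omega
      · exact hfirst j hj' hjJ heq

lemma pv_foldrB_good (arrays hes : List Int) : ∀ (m : Nat) (st : Int × Int × Int),
    pvGoodB arrays hes m st →
    pvGoodB arrays hes 0 ((List.range m).foldr (fun k acc => pvStepB arrays hes acc k) st) := by
  intro m
  induction m with
  | zero => intro st hg; simpa using hg
  | succ m ih =>
    intro st hg
    rw [List.range_succ, List.foldr_append]
    exact ih _ (pvStepB_good arrays hes m st hg)

-- ===== VERDICT (by name: the statement is the Claim_ definition above) =====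
theorem lmax_acc_spec : Claim_equal_lmax_acc := by
  intro arrays hes _ hpre
  obtain ⟨hne, hlen, i0, hi0n, hi0max, hi0he⟩ := hpre
  unfold Spec_lmax_acc
  have hn1 : 1 ≤ arrays.length := List.length_pos_of_ne_nil hne
  -- facts about the maximum
  obtain ⟨M, hM⟩ : ∃ M, PySem.List.max? arrays (fun y => y) = some M := by
    cases hmx : PySem.List.max? arrays (fun y => y) with
    | none => exact absurd ((PySem.List.max?_eq_none_iff _ _).mp hmx) hne
    | some M => exact ⟨M, rfl⟩
  have hMD : (PySem.List.max? arrays (fun y => y)).getD 0 = M := by rw [hM]; rfl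
  have hMmax : ∀ y ∈ arrays, y ≤ M := PySem.List.max?_isMax hM
  have hmax_getD : ∀ j, j < arrays.length → arrays.getD j 0 ≤ M := by
    intro j hj
    rw [List.getD_eq_getElem _ _ hj]
    exact hMmax _ (List.getElem_mem hj)
  obtain ⟨jM, hjMn, hjMval⟩ := List.mem_iff_getElem.mp (PySem.List.max?_mem hM)
  have hjMD : arrays.getD jM 0 = M := by rw [List.getD_eq_getElem _ _ hjMn]; exact hjMval
  rw [hMD] at hi0max
  -- evaluate A's pipeline
  simp only [lmax_acc, lmax_acc_alt, hMD]
  rw [PySem.List.foldl_append_ite_eq_filter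
      (fun indx => PySem.List.pyGetD arrays indx 0 = M) _ [],
    List.nil_append, PySem.List.pyRange_zero_natCast, List.filter_map, List.foldl_map]
  simp only [Function.comp_def, PySem.List.pyGetD_natCast]
  rw [pv_foldA_sel (fun k => hes.getD k 0)
      ((List.range arrays.length).filter (fun k => decide (arrays.getD k 0 = M))) none 10]
  -- A's selected index
  have hmemK : ∀ j, j < arrays.length → arrays.getD j 0 = M →
      j ∈ (List.range arrays.length).filter (fun k => decide (arrays.getD k 0 = M)) := by
    intro j hj hjv
    exact List.mem_filter.mpr ⟨List.mem_range.mpr hj, decide_eq_true hjv⟩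
  obtain ⟨d, hd⟩ : ∃ d, pvSel (fun k => hes.getD k 0)
      ((List.range arrays.length).filter (fun k => decide (arrays.getD k 0 = M))) 10 = some d := by
    cases hsel : pvSel (fun k => hes.getD k 0)
        ((List.range arrays.length).filter (fun k => decide (arrays.getD k 0 = M))) 10 with
    | none =>
      have := (pvSel_none_iff _ _ 10).mp hsel i0 (hmemK i0 hi0n hi0max)
      omega
    | some d => exact ⟨d, rfl⟩
  obtain ⟨hdK, hdlt, hdmin, K1, K2, hKsplit, hdfirst⟩ := pvSel_spec _ _ 10 d hd
  obtain ⟨hdrange, hdval⟩ := List.mem_filter.mp hdK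
  have hdn : d < arrays.length := List.mem_range.mp hdrange
  have hdM : arrays.getD d 0 = M := of_decide_eq_true hdval
  have hKpw : ((List.range arrays.length).filter
      (fun k => decide (arrays.getD k 0 = M))).Pairwise (· < ·) :=
    (List.pairwise_lt_range).filter _
  have hAfirst : ∀ j, j < d → j < arrays.length → arrays.getD j 0 = M →
      hes.getD d 0 < hes.getD j 0 := by
    intro j hjd hjn hjv
    have hjK := hmemK j hjn hjv
    rw [hKsplit] at hjK hKpw
    obtain ⟨_, hpw2, _⟩ := List.pairwise_append.mp hKpw
    rcases List.mem_append.mp hjK with hj1 | hj2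
    · exact hdfirst j hj1
    · rcases List.mem_cons.mp hj2 with rfl | hj2
      · omega
      · have := (List.pairwise_cons.mp hpw2).1 j hj2
        omega
  -- evaluate B's pipeline
  have h2 : (arrays.length : Int) - 2 = ((arrays.length - 1 : Nat) : Int) - 1 := by omega
  have h1 : (arrays.length : Int) - 1 = ((arrays.length - 1 : Nat) : Int) := by omega
  rw [h2, h1, pv_pyRange_down (arrays.length - 1), List.foldl_reverse, List.foldr_map]
  simp only [PySem.List.pyGetD_natCast]
  have hGood : pvGoodB arrays hes 0 ((List.range (arrays.length - 1)).foldr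
      (fun k acc => pvStepB arrays hes acc k)
      (arrays.getD (arrays.length - 1) 0, hes.getD (arrays.length - 1) 0,
        ((arrays.length - 1 : Nat) : Int))) := by
    apply pv_foldrB_good
    refine ⟨arrays.length - 1, rfl, le_refl _, by omega, ?_, ?_, ?_⟩
    · intro j hj hjn
      have : j = arrays.length - 1 := by omega
      subst this; exact le_refl _
    · intro j hj hjn _
      have : j = arrays.length - 1 := by omega
      subst this; exact le_refl _
    · intro j hj hjJ _
      omega
  obtain ⟨JB, hstB, _, hJBn, hBmax, hBmin, hBfirst⟩ := hGood
  simp only [pvStepB] at hstB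
  rw [hstB]
  -- B's index is an argmax
  have hJBM : arrays.getD JB 0 = M := by
    have h1' := hmax_getD JB hJBn
    have h2' := hBmax jM (Nat.zero_le _) hjMn
    omega
  -- A's and B's indices agree
  have hJBK := hmemK JB hJBn hJBM
  have hdJB : d = JB := by
    rcases Nat.lt_trichotomy d JB with hlt | heq | hgt
    · have hb := hBfirst d (Nat.zero_le _) hlt (by omega)
      have ha := hdmin JB hJBK
      simp only at ha
      omega
    · exact heq
    · have ha := hAfirst JB hgt hJBn hJBM
      have hb := hBmin d (Nat.zero_le _) hdn (by omega)
      omega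
  subst hdJB
  rw [hd, hJBM]
  rfl
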